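-- pv_equiv track=rewrite | github.com/rfveds/WolfAndSheep | board.py | sheep_with_one_move
-- ===== SOURCE A (Python) =====
-- def sheep_with_one_move(sh_moves):
--     sheep_0_moves = []
--     sheep_1_moves = []
--     sheep_2_moves = []
--     sheep_3_moves = []
--
--     for sheep in sh_moves:
--         if sheep[0] == 0:
--             sheep_0_moves.append(sheep)
--         if sheep[0] == 1:
--             sheep_1_moves.append(sheep)
--         if sheep[0] == 2:
--             sheep_2_moves.append(sheep)
--         if sheep[0] == 3:
--             sheep_3_moves.append(sheep)
--
--     with_one_move = []
--     if 0 < len(sheep_0_moves) < 2: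
--         with_one_move.append(sheep_0_moves[0])
--     if 0 < len(sheep_1_moves) < 2:
--         with_one_move.append(sheep_1_moves[0])
--     if 0 < len(sheep_2_moves) < 2:
--         with_one_move.append(sheep_2_moves[0])
--     if 0 < len(sheep_3_moves) < 2:
--         with_one_move.append(sheep_3_moves[0])
--
--     return with_one_move
-- ===== SOURCE B (Python) =====
-- def sheep_with_one_move(sh_moves):
--     result = []
--     for k in (0, 1, 2, 3):
--         matches = [sheep for sheep in sh_moves if sheep[0] == k]
--         if len(matches) == 1:
--             result.append(matches[0])
--     return result
-- ===== Notes on version B (the rewrite author's own statement) =====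
-- stated objective: idiomatic
-- what changed: Replaces the four named bucket lists built in one pass by a loop over the keys 0-3 that filters sh_moves per key and appends the unique match when exactly one exists.
import Mathlib
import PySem

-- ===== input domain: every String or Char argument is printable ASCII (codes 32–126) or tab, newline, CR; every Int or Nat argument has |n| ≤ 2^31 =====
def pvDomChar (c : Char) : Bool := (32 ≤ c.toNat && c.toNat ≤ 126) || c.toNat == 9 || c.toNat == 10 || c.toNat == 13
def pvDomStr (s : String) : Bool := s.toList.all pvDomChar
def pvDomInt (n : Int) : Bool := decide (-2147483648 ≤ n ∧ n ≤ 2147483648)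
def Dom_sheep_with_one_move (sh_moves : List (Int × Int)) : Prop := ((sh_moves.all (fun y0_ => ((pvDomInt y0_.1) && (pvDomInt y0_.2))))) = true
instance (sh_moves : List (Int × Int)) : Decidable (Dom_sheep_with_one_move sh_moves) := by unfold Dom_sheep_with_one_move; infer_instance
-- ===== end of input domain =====

-- B replaces A's one-pass bucketing into four named lists by an idiomatic loop over
-- the keys 0-3 that filters per key; same return value, no speed claim.

-- ===== PORT A =====
-- one loop appending each sheep to the bucket of its first coordinate (four independent ifs)
def sheep_with_one_move (sh_moves : List (Int × Int)) : List (Int × Int) :=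
  let st := sh_moves.foldl
    (fun (st : List (Int × Int) × List (Int × Int) × List (Int × Int) × List (Int × Int)) sheep =>
      let st := if sheep.1 = 0 then (st.1 ++ [sheep], st.2.1, st.2.2.1, st.2.2.2) else st
      let st := if sheep.1 = 1 then (st.1, st.2.1 ++ [sheep], st.2.2.1, st.2.2.2) else st
      let st := if sheep.1 = 2 then (st.1, st.2.1, st.2.2.1 ++ [sheep], st.2.2.2) else st
      let st := if sheep.1 = 3 then (st.1, st.2.1, st.2.2.1, st.2.2.2 ++ [sheep]) else st
      st)
    ([], [], [], [])
  let w := []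
  let w := if 0 < st.1.length ∧ st.1.length < 2 then w ++ st.1.take 1 else w
  let w := if 0 < st.2.1.length ∧ st.2.1.length < 2 then w ++ st.2.1.take 1 else w
  let w := if 0 < st.2.2.1.length ∧ st.2.2.1.length < 2 then w ++ st.2.2.1.take 1 else w
  let w := if 0 < st.2.2.2.length ∧ st.2.2.2.length < 2 then w ++ st.2.2.2.take 1 else w
  w

-- ===== PORT B =====
def sheep_with_one_move_alt (sh_moves : List (Int × Int)) : List (Int × Int) :=
  ([0, 1, 2, 3] : List Int).foldl
    (fun result k =>
      let ms := sh_moves.filter (fun sheep => sheep.1 == k)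
      if ms.length = 1 then result ++ ms.take 1 else result)
    []

-- ===== PRECONDITION & SPEC =====
def Spec_sheep_with_one_move (sh_moves : List (Int × Int)) (out : List (Int × Int)) : Prop := out = sheep_with_one_move_alt sh_moves
instance (sh_moves : List (Int × Int)) (out : List (Int × Int)) : Decidable (Spec_sheep_with_one_move sh_moves out) := by unfold Spec_sheep_with_one_move; infer_instance

-- ===== CLAIM (what is proved, stated in full; the proofs are below) =====
def Claim_equal_sheep_with_one_move : Prop := ∀ (sh_moves : List (Int × Int)), Dom_sheep_with_one_move sh_moves → Spec_sheep_with_one_move sh_moves (sheep_with_one_move sh_moves)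

-- ===== LEMMAS AND PROOFS =====

-- A's fold fills the four buckets with exactly the per-key filters
theorem pv_fold_buckets (sh_moves : List (Int × Int))
    (a b c d : List (Int × Int)) :
    sh_moves.foldl
      (fun (st : List (Int × Int) × List (Int × Int) × List (Int × Int) × List (Int × Int)) sheep =>
        let st := if sheep.1 = 0 then (st.1 ++ [sheep], st.2.1, st.2.2.1, st.2.2.2) else st
        let st := if sheep.1 = 1 then (st.1, st.2.1 ++ [sheep], st.2.2.1, st.2.2.2) else st
        let st := if sheep.1 = 2 then (st.1, st.2.1, st.2.2.1 ++ [sheep], st.2.2.2) else st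
        let st := if sheep.1 = 3 then (st.1, st.2.1, st.2.2.1, st.2.2.2 ++ [sheep]) else st
        st)
      (a, b, c, d)
    = (a ++ sh_moves.filter (fun s => s.1 == 0),
       b ++ sh_moves.filter (fun s => s.1 == 1),
       c ++ sh_moves.filter (fun s => s.1 == 2),
       d ++ sh_moves.filter (fun s => s.1 == 3)) := by
  induction sh_moves generalizing a b c d with
  | nil => simp
  | cons x xs ih =>
    simp only [List.foldl_cons, List.filter_cons]
    by_cases h0 : x.1 = 0 <;> by_cases h1 : x.1 = 1 <;> by_cases h2 : x.1 = 2 <;>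
      by_cases h3 : x.1 = 3 <;>
      simp_all [List.append_assoc]

theorem pv_len_one (l : List (Int × Int)) : (0 < l.length ∧ l.length < 2) ↔ l.length = 1 := by
  omega

-- ===== VERDICT (by name: the statement is the Claim_ definition above) =====
theorem sheep_with_one_move_spec : Claim_equal_sheep_with_one_move := by
  intro sh_moves _
  unfold Spec_sheep_with_one_move sheep_with_one_move sheep_with_one_move_alt
  simp only [pv_fold_buckets, List.nil_append]
  simp only [List.foldl_cons, List.foldl_nil]
  simp only [pv_len_one, List.nil_append]
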